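-- pv_equiv track=rewrite | github.com/macdonc2/htown_mania | app/adapters/agents/reddit_events_agent.py | _categorize_line
-- ===== SOURCE A (Python) =====
-- from typing import List
--
-- def _categorize_line(text: str) -> List[str]:
--     """Categorize based on keywords."""
--     categories = []
--
--     if any(k in text for k in ['bike', 'cycling', 'ride', 'pedal']):
--         categories.append('cycling')
--
--     if any(k in text for k in ['concert', 'music', 'band', 'show', 'dj']):
--         categories.append('music')
--
--     if any(k in text for k in ['food', 'restaurant', 'dining', 'brunch']):
--         categories.append('food')
--
--     if any(k in text for k in ['art', 'gallery', 'museum', 'exhibit']):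
--         categories.append('arts')
--
--     if any(k in text for k in ['market', 'fair', 'festival']):
--         categories.append('outdoor')
--
--     return categories
-- ===== SOURCE B (Python) =====
-- from typing import List
--
-- # (keyword, category) pairs; categories emitted in _ORDER
-- _KEYWORDS = [
--     ('bike', 'cycling'), ('cycling', 'cycling'), ('ride', 'cycling'), ('pedal', 'cycling'),
--     ('concert', 'music'), ('music', 'music'), ('band', 'music'), ('show', 'music'), ('dj', 'music'),
--     ('food', 'food'), ('restaurant', 'food'), ('dining', 'food'), ('brunch', 'food'),
--     ('art', 'arts'), ('gallery', 'arts'), ('museum', 'arts'), ('exhibit', 'arts'),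
--     ('market', 'outdoor'), ('fair', 'outdoor'), ('festival', 'outdoor'),
-- ]
-- _ORDER = ['cycling', 'music', 'food', 'arts', 'outdoor']
--
-- def _categorize_line(text: str) -> List[str]:
--     """Single left-to-right scan over the text: at each position, check which
--     keywords start there and accumulate their categories in a set; finally
--     emit the found categories in the canonical order."""
--     found = set()
--     for i in range(len(text)):
--         for kw, cat in _KEYWORDS:
--             if cat not in found and text.startswith(kw, i):
--                 found.add(cat)
--     return [c for c in _ORDER if c in found]
-- ===== Notes on version B (the rewrite author's own statement) =====
-- stated objective: alternative
-- what changed: Instead of five per-category any-substring membership tests, B makes one left-to-right scan over the text positions, matching a flat (keyword, category) table at each position into a found-set, then emits found categories in canonical order.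
import Mathlib
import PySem

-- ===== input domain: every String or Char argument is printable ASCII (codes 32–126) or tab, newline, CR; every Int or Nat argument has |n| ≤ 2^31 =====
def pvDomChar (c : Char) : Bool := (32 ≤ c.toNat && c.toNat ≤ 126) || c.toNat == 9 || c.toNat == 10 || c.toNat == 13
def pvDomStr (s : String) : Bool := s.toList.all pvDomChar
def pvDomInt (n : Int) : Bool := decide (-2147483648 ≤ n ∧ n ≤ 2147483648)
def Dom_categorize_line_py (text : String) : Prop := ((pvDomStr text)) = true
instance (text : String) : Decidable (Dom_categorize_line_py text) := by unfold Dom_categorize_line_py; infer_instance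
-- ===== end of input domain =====

-- B: instead of five per-category any-substring tests, one left-to-right scan over text positions
-- matching a flat (keyword, category) table into a found-set, emitted in canonical order (alternative, same cost).


-- ===== PORT A =====
def categorize_line_py (text : String) : List String :=
  let categories : List String := []
  let categories := if (["bike", "cycling", "ride", "pedal"].any (fun k => PySem.Str.isIn k text)) then categories ++ ["cycling"] else categories
  let categories := if (["concert", "music", "band", "show", "dj"].any (fun k => PySem.Str.isIn k text)) then categories ++ ["music"] else categories
  let categories := if (["food", "restaurant", "dining", "brunch"].any (fun k => PySem.Str.isIn k text)) then categories ++ ["food"] else categories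
  let categories := if (["art", "gallery", "museum", "exhibit"].any (fun k => PySem.Str.isIn k text)) then categories ++ ["arts"] else categories
  let categories := if (["market", "fair", "festival"].any (fun k => PySem.Str.isIn k text)) then categories ++ ["outdoor"] else categories
  categories

-- ===== PORT B =====
-- flat (keyword, category) table, and the canonical output order
def pvKeywords : List (String × String) :=
  [("bike", "cycling"), ("cycling", "cycling"), ("ride", "cycling"), ("pedal", "cycling"),
   ("concert", "music"), ("music", "music"), ("band", "music"), ("show", "music"), ("dj", "music"),
   ("food", "food"), ("restaurant", "food"), ("dining", "food"), ("brunch", "food"),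
   ("art", "arts"), ("gallery", "arts"), ("museum", "arts"), ("exhibit", "arts"),
   ("market", "outdoor"), ("fair", "outdoor"), ("festival", "outdoor")]
def pvOrder : List String := ["cycling", "music", "food", "arts", "outdoor"]

-- inner loop of Source B: one text position i; text.startswith(kw, i) is exact as
-- 'kw.toList is a prefix of cs.drop i' for 0 ≤ i (PySem.Chars.startswith)
def pvScanPos (cs : List Char) (found : PySem.Set String) (i : Nat) : PySem.Set String :=
  pvKeywords.foldl (fun f p =>
    if !(PySem.Set.contains f p.2) && PySem.Chars.startswith (cs.drop i) p.1.toList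
    then PySem.Set.add f p.2 else f) found

-- outer loop of Source B: for i in range(len(text))
def pvFound (cs : List Char) : PySem.Set String :=
  (List.range cs.length).foldl (pvScanPos cs) PySem.Set.empty

def categorize_line_py_alt (text : String) : List String :=
  let found := pvFound text.toList
  pvOrder.filter (fun c => PySem.Set.contains found c)

-- ===== PRECONDITION & SPEC =====
def Spec_categorize_line_py (text : String) (out : List String) : Prop := out = categorize_line_py_alt text
instance (text : String) (out : List String) : Decidable (Spec_categorize_line_py text out) := by unfold Spec_categorize_line_py; infer_instance

-- ===== CLAIM (what is proved, stated in full; the proofs are below) =====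
def Claim_equal_categorize_line_py : Prop := ∀ (text : String), Dom_categorize_line_py text → Spec_categorize_line_py text (categorize_line_py text)

-- ===== LEMMAS AND PROOFS =====

-- every keyword in the table is nonempty
theorem pvKeywords_ne_nil : ∀ p ∈ pvKeywords, p.1.toList ≠ [] := by decide

-- membership after the inner keyword loop (generalized over the keyword list)
theorem mem_innerfold (cs : List Char) (i : Nat) (kws : List (String × String))
    (f : PySem.Set String) (c : String) :
    c ∈ kws.foldl (fun f p =>
        if !(PySem.Set.contains f p.2) && PySem.Chars.startswith (cs.drop i) p.1.toList
        then PySem.Set.add f p.2 else f) f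
      ↔ c ∈ f ∨ ∃ p ∈ kws, p.2 = c ∧ PySem.Chars.startswith (cs.drop i) p.1.toList = true := by
  induction kws generalizing f with
  | nil => simp
  | cons p rest ih =>
    have hstep : c ∈ (if !(PySem.Set.contains f p.2) && PySem.Chars.startswith (cs.drop i) p.1.toList
        then PySem.Set.add f p.2 else f)
        ↔ c ∈ f ∨ (p.2 = c ∧ PySem.Chars.startswith (cs.drop i) p.1.toList = true) := by
      split_ifs with hg
      · simp only [Bool.and_eq_true, Bool.not_eq_true'] at hg
        simp only [PySem.Set.mem_add]
        constructor
        · rintro (h | h)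
          · exact Or.inl h
          · exact Or.inr ⟨h ▸ rfl, hg.2⟩
        · rintro (h | ⟨h2, _⟩)
          · exact Or.inl h
          · exact Or.inr h2.symm
      · constructor
        · exact Or.inl
        · rintro (h | ⟨h2, h3⟩)
          · exact h
          · have hc : p.2 ∈ f := by
              by_cases hf : PySem.Set.contains f p.2 = true
              · rw [PySem.Set.contains_iff] at hf; exact hf
              · exact absurd (by simp at hf ⊢; exact ⟨hf, h3⟩) hg
            exact h2 ▸ hc
    simp only [List.foldl_cons, ih, hstep, List.mem_cons]
    constructor
    · rintro ((h | h) | ⟨q, hq, h2⟩)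
      · exact Or.inl h
      · exact Or.inr ⟨p, Or.inl rfl, h⟩
      · exact Or.inr ⟨q, Or.inr hq, h2⟩
    · rintro (h | ⟨q, hq | hq, h2⟩)
      · exact Or.inl (Or.inl h)
      · exact Or.inl (Or.inr (hq ▸ h2))
      · exact Or.inr ⟨q, hq, h2⟩

-- membership after the outer position loop
theorem mem_outerfold (cs : List Char) (is : List Nat) (f : PySem.Set String) (c : String) :
    c ∈ is.foldl (pvScanPos cs) f
      ↔ c ∈ f ∨ ∃ i ∈ is, ∃ p ∈ pvKeywords, p.2 = c ∧
          PySem.Chars.startswith (cs.drop i) p.1.toList = true := by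
  induction is generalizing f with
  | nil => simp
  | cons i rest ih =>
    simp only [List.foldl_cons, ih, pvScanPos, mem_innerfold, List.mem_cons]
    constructor
    · rintro ((h | ⟨p, hp, h2, h3⟩) | ⟨j, hj, hp⟩)
      · exact Or.inl h
      · exact Or.inr ⟨i, Or.inl rfl, p, hp, h2, h3⟩
      · exact Or.inr ⟨j, Or.inr hj, hp⟩
    · rintro (h | ⟨j, hj | hj, hp⟩)
      · exact Or.inl (Or.inl h)
      · exact Or.inl (Or.inr (hj ▸ hp))
      · exact Or.inr ⟨j, hj, hp⟩

-- a nonempty keyword occurs at some scanned position iff 'kw in text'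
theorem exists_pos_prefix (text k : String) (hk : k.toList ≠ []) :
    (∃ i ∈ List.range text.toList.length, k.toList <+: text.toList.drop i)
      ↔ PySem.Str.isIn k text = true := by
  rw [PySem.Str.isIn_iff_infix, ← PySem.Chars.isIn_iff_infix,
      ← PySem.Chars.exists_prefix_drop_iff_isIn]
  constructor
  · rintro ⟨i, _, h⟩; exact ⟨i, h⟩
  · rintro ⟨i, h⟩
    by_cases hi : i < text.toList.length
    · exact ⟨i, List.mem_range.mpr hi, h⟩
    · exfalso
      rw [List.drop_eq_nil_of_le (le_of_not_gt hi)] at h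
      exact hk (List.prefix_nil.mp h)

-- the found-set contains a category iff one of its table keywords occurs in the text
theorem mem_found_iff (text : String) (c : String) :
    c ∈ pvFound text.toList
      ↔ ∃ p ∈ pvKeywords, p.2 = c ∧ PySem.Str.isIn p.1 text = true := by
  rw [pvFound, mem_outerfold]
  simp only [PySem.Set.empty, List.not_mem_nil, false_or]
  constructor
  · rintro ⟨i, hi, p, hp, h2, h3⟩
    exact ⟨p, hp, h2, (exists_pos_prefix text p.1 (pvKeywords_ne_nil p hp)).mp
      ⟨i, hi, (PySem.Chars.startswith_iff _ _).mp h3⟩⟩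
  · rintro ⟨p, hp, h2, hin⟩
    obtain ⟨i, hi, hpre⟩ := (exists_pos_prefix text p.1 (pvKeywords_ne_nil p hp)).mpr hin
    exact ⟨i, hi, p, hp, h2, (PySem.Chars.startswith_iff _ _).mpr hpre⟩

-- the five per-category found-set tests, as A's boolean conditions
theorem found_cycling (text : String) :
    PySem.Set.contains (pvFound text.toList) "cycling"
      = (["bike", "cycling", "ride", "pedal"].any (fun k => PySem.Str.isIn k text)) := by
  rw [Bool.eq_iff_iff, PySem.Set.contains_iff, mem_found_iff]
  simp [pvKeywords]

theorem found_music (text : String) :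
    PySem.Set.contains (pvFound text.toList) "music"
      = (["concert", "music", "band", "show", "dj"].any (fun k => PySem.Str.isIn k text)) := by
  rw [Bool.eq_iff_iff, PySem.Set.contains_iff, mem_found_iff]
  simp [pvKeywords]

theorem found_food (text : String) :
    PySem.Set.contains (pvFound text.toList) "food"
      = (["food", "restaurant", "dining", "brunch"].any (fun k => PySem.Str.isIn k text)) := by
  rw [Bool.eq_iff_iff, PySem.Set.contains_iff, mem_found_iff]
  simp [pvKeywords]

theorem found_arts (text : String) :
    PySem.Set.contains (pvFound text.toList) "arts"
      = (["art", "gallery", "museum", "exhibit"].any (fun k => PySem.Str.isIn k text)) := by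
  rw [Bool.eq_iff_iff, PySem.Set.contains_iff, mem_found_iff]
  simp [pvKeywords]

theorem found_outdoor (text : String) :
    PySem.Set.contains (pvFound text.toList) "outdoor"
      = (["market", "fair", "festival"].any (fun k => PySem.Str.isIn k text)) := by
  rw [Bool.eq_iff_iff, PySem.Set.contains_iff, mem_found_iff]
  simp [pvKeywords]

-- ===== VERDICT (by name: the statement is the Claim_ definition above) =====
theorem categorize_line_py_spec : Claim_equal_categorize_line_py := by
  intro text _
  unfold Spec_categorize_line_py categorize_line_py categorize_line_py_alt pvOrder
  simp only [List.filter_cons, List.filter_nil,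
    found_cycling, found_music, found_food, found_arts, found_outdoor]
  split_ifs <;> rfl
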